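-- pv_equiv track=rewrite | github.com/Freskoko/BINF100 | labs/lab3proteins/src/main.py | alignment_stats
-- ===== SOURCE A (Python) =====
-- GAP_PENALTY = -2
--
-- MATCH = 1
--
-- MISMATCH = -1
--
-- def alignment_stats(align1: str, align2: str) -> tuple[int, int, int]:
--     """
--     Calculates the score of an alignment.
--
--     Args:
--         align1 (str): The first aligned sequence.
--         align2 (str): The second aligned sequence.
--
--     Returns:
--         int: The score of the alignment.
--         int: amount of matches
--         int: amount of gaps
--     """
--     score = 0
--     matches = 0
--     gaps = 0
--     for a, b in zip(align1, align2):
--         if a == "-" or b == "-":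
--             score += GAP_PENALTY
--             gaps += 1
--         elif a == b:
--             score += MATCH
--             matches += 1
--         else:
--             score += MISMATCH
--     return score, matches, gaps
-- ===== SOURCE B (Python) =====
-- GAP_PENALTY = -2
--
-- MATCH = 1
--
-- MISMATCH = -1
--
-- def alignment_stats(align1: str, align2: str) -> tuple[int, int, int]:
--     """Counts matches and gaps in one pass; the score is derived in closed form:
--     score = 2*matches - gaps - n, with n the number of aligned pairs."""
--     pairs = list(zip(align1, align2))
--     n = len(pairs)
--     gaps = sum(1 for a, b in pairs if a == "-" or b == "-")
--     matches = sum(1 for a, b in pairs if a == b and a != "-")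
--     return 2 * matches - gaps - n, matches, gaps
-- ===== Notes on version B (the rewrite author's own statement) =====
-- stated objective: alternative
-- what changed: B counts matches and gaps declaratively over the zipped pairs and derives the score by the closed form 2*matches - gaps - n instead of accumulating score, matches and gaps together in one stateful loop.
import Mathlib
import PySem

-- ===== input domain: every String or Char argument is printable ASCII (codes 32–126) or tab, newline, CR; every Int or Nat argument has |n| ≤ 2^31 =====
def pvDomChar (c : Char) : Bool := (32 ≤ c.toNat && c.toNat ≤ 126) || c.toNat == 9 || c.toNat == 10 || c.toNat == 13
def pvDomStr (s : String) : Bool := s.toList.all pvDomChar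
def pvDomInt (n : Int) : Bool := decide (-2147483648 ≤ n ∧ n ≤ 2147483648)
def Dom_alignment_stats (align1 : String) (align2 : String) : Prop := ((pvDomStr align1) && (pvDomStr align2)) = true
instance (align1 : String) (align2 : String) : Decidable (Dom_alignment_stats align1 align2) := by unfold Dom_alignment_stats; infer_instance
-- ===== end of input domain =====

-- B derives the score arithmetically from match/gap counts instead of accumulating it per position; same cost, different decomposition.

-- ===== PORT A =====
def pvGAP_PENALTY : Int := -2
def pvMATCH : Int := 1
def pvMISMATCH : Int := -1

-- the loop over zip(align1, align2) with state (score, matches, gaps)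
def alignment_stats (align1 : String) (align2 : String) : Int × Int × Int :=
  (align1.toList.zip align2.toList).foldl
    (fun (st : Int × Int × Int) (p : Char × Char) =>
      if p.1 = '-' ∨ p.2 = '-' then (st.1 + pvGAP_PENALTY, st.2.1, st.2.2 + 1)
      else if p.1 = p.2 then (st.1 + pvMATCH, st.2.1 + 1, st.2.2)
      else (st.1 + pvMISMATCH, st.2.1, st.2.2))
    (0, 0, 0)

-- ===== PORT B =====
def alignment_stats_alt (align1 : String) (align2 : String) : Int × Int × Int :=
  let pairs := align1.toList.zip align2.toList
  let n : Int := pairs.length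
  let gaps : Int := (pairs.countP (fun p => p.1 = '-' ∨ p.2 = '-') : Nat)
  let mtchs : Int := (pairs.countP (fun p => p.1 = p.2 ∧ p.1 ≠ '-') : Nat)
  (2 * mtchs - gaps - n, mtchs, gaps)

-- ===== PRECONDITION & SPEC =====
def Spec_alignment_stats (align1 : String) (align2 : String) (out : Int × Int × Int) : Prop := out = alignment_stats_alt align1 align2
instance (align1 : String) (align2 : String) (out : Int × Int × Int) : Decidable (Spec_alignment_stats align1 align2 out) := by unfold Spec_alignment_stats; infer_instance

-- ===== CLAIM (what is proved, stated in full; the proofs are below) =====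
def Claim_equal_alignment_stats : Prop := ∀ (align1 : String) (align2 : String), Dom_alignment_stats align1 align2 → Spec_alignment_stats align1 align2 (alignment_stats align1 align2)

-- ===== LEMMAS AND PROOFS =====

-- loop invariant: A's fold, started from any accumulator, equals the closed form over counts
theorem alignment_loop_eq (l : List (Char × Char)) (s m g : Int) :
    l.foldl
      (fun (st : Int × Int × Int) (p : Char × Char) =>
        if p.1 = '-' ∨ p.2 = '-' then (st.1 + pvGAP_PENALTY, st.2.1, st.2.2 + 1)
        else if p.1 = p.2 then (st.1 + pvMATCH, st.2.1 + 1, st.2.2)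
        else (st.1 + pvMISMATCH, st.2.1, st.2.2))
      (s, m, g)
    = (s + 2 * ((l.countP (fun p => p.1 = p.2 ∧ p.1 ≠ '-') : Nat) : Int)
         - ((l.countP (fun p => p.1 = '-' ∨ p.2 = '-') : Nat) : Int) - (l.length : Int),
       m + ((l.countP (fun p => p.1 = p.2 ∧ p.1 ≠ '-') : Nat) : Int),
       g + ((l.countP (fun p => p.1 = '-' ∨ p.2 = '-') : Nat) : Int)) := by
  induction l generalizing s m g with
  | nil => simp
  | cons hd tl ih =>
    by_cases h1 : hd.1 = '-' ∨ hd.2 = '-'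
    · have hm : ¬ (hd.1 = hd.2 ∧ hd.1 ≠ '-') := by
        rcases h1 with h | h
        · exact fun ⟨_, hne⟩ => hne h
        · exact fun ⟨he, hne⟩ => hne (he.trans h)
      rw [List.foldl_cons, if_pos h1, ih]
      rw [List.countP_cons, List.countP_cons, List.length_cons,
          decide_eq_true h1, decide_eq_false hm]
      simp only [if_true, if_false, Prod.mk.injEq]
      refine ⟨?_, ?_, ?_⟩ <;> (push_cast; simp [pvGAP_PENALTY]; try ring)
    · by_cases h2 : hd.1 = hd.2
      · have hm : hd.1 = hd.2 ∧ hd.1 ≠ '-' := ⟨h2, fun h => h1 (Or.inl h)⟩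
        rw [List.foldl_cons, if_neg h1, if_pos h2, ih]
        rw [List.countP_cons, List.countP_cons, List.length_cons,
            decide_eq_false h1, decide_eq_true hm]
        simp only [if_true, if_false, Prod.mk.injEq]
        refine ⟨?_, ?_, ?_⟩ <;> (push_cast; simp [pvMATCH]; try ring)
      · have hm : ¬ (hd.1 = hd.2 ∧ hd.1 ≠ '-') := fun ⟨h, _⟩ => h2 h
        rw [List.foldl_cons, if_neg h1, if_neg h2, ih]
        rw [List.countP_cons, List.countP_cons, List.length_cons,
            decide_eq_false h1, decide_eq_false hm]
        simp only [if_true, if_false, Prod.mk.injEq]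
        refine ⟨?_, ?_, ?_⟩ <;> (push_cast; simp [pvMISMATCH]; try ring)

-- ===== VERDICT (by name: the statement is the Claim_ definition above) =====
theorem alignment_stats_spec : Claim_equal_alignment_stats := by
  intro a1 a2 _
  unfold Spec_alignment_stats alignment_stats alignment_stats_alt
  rw [alignment_loop_eq]
  simp only [zero_add]
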